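-- pv_equiv track=rewrite | github.com/Hyperkit-Labs/hyperagent | services/orchestrator/agents/audit_agent.py | has_echidna_harness
-- ===== SOURCE A (Python) =====
-- def has_echidna_harness(test_files: dict) -> bool:
--     """True if test files contain Echidna invariants or assertion-heavy properties."""
--     if not test_files or not isinstance(test_files, dict):
--         return False
--     combined = " ".join(
--         str(v) for v in test_files.values() if isinstance(v, str)
--     ).lower()
--     return (
--         "invariant_" in combined
--         or "echidna" in combined
--         or ("assert(" in combined and "test" in combined)
--     )
-- ===== SOURCE B (Python) =====
-- def has_echidna_harness(test_files: dict) -> bool: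
--     """True if test files contain Echidna invariants or assertion-heavy properties."""
--     inv = ech = asrt = tst = False
--     for v in test_files.values():
--         low = v.lower()
--         inv = inv or "invariant_" in low
--         ech = ech or "echidna" in low
--         asrt = asrt or "assert(" in low
--         tst = tst or "test" in low
--     return inv or ech or (asrt and tst)
-- ===== Notes on version B (the rewrite author's own statement) =====
-- stated objective: alternative
-- what changed: Instead of concatenating all dict values into one space-joined lowercased string and scanning it, B keeps four boolean flags and ORs in each marker per value in a single pass, never materialising the combined string; this is exact because no marker contains a space.
import Mathlib
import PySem

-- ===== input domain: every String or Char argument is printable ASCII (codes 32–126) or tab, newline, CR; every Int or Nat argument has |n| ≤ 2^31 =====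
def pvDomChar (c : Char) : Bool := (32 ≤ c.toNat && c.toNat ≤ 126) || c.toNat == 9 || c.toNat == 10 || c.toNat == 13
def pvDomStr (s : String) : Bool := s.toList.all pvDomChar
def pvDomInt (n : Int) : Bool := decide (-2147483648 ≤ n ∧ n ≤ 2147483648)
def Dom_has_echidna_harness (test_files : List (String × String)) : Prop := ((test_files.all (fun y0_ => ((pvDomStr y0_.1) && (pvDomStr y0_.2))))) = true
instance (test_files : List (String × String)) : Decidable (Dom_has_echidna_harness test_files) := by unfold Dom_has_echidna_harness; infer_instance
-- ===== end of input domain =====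

-- B avoids building the space-joined combined string: one pass over the dict values,
-- OR-ing four per-value marker flags (exact because no marker contains a space). Same cost; alternative decomposition.


-- ===== PORT A =====
def has_echidna_harness (test_files : List (String × String)) : Bool :=
  -- if not test_files: return False  (isinstance check is always true on this typed domain)
  if test_files = [] then false
  else
    -- combined = " ".join(str(v) for v in test_files.values() if isinstance(v, str)).lower()
    -- (every value is a str here, so the filter keeps all and str(v) = v)
    let combined := PySem.Str.lower (PySem.Str.join " " ((PySem.Dict.mk test_files).values))
    PySem.Str.isIn "invariant_" combined || PySem.Str.isIn "echidna" combined ||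
      (PySem.Str.isIn "assert(" combined && PySem.Str.isIn "test" combined)

-- ===== PORT B =====
-- B-side helper: one loop step, OR-ing the four marker flags with this value's lowercased text
def pvStep (acc : Bool × Bool × Bool × Bool) (v : String) : Bool × Bool × Bool × Bool :=
  let low := PySem.Str.lower v
  (acc.1 || PySem.Str.isIn "invariant_" low,
   acc.2.1 || PySem.Str.isIn "echidna" low,
   acc.2.2.1 || PySem.Str.isIn "assert(" low,
   acc.2.2.2 || PySem.Str.isIn "test" low)

def has_echidna_harness_alt (test_files : List (String × String)) : Bool :=
  let r := ((PySem.Dict.mk test_files).values).foldl pvStep (false, false, false, false)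
  r.1 || r.2.1 || (r.2.2.1 && r.2.2.2)

-- ===== PRECONDITION & SPEC =====
def Spec_has_echidna_harness (test_files : List (String × String)) (out : Bool) : Prop := out = has_echidna_harness_alt test_files
instance (test_files : List (String × String)) (out : Bool) : Decidable (Spec_has_echidna_harness test_files out) := by unfold Spec_has_echidna_harness; infer_instance

-- ===== CLAIM (what is proved, stated in full; the proofs are below) =====
def Claim_equal_has_echidna_harness : Prop := ∀ (test_files : List (String × String)), Dom_has_echidna_harness test_files → Spec_has_echidna_harness test_files (has_echidna_harness test_files)

-- ===== LEMMAS AND PROOFS =====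

-- a space-free pattern that is a prefix of u ++ ' ' :: v is a prefix of u
theorem pv_prefix_of_sep {m u v : List Char} (hm : ' ' ∉ m) (h : m <+: u ++ ' ' :: v) : m <+: u := by
  induction u generalizing m with
  | nil =>
    cases m with
    | nil => simp
    | cons a t =>
      rw [List.nil_append, List.cons_prefix_cons] at h
      exact absurd (h.1 ▸ List.mem_cons_self) hm
  | cons b u' ih =>
    cases m with
    | nil => simp
    | cons a t =>
      rw [List.cons_append, List.cons_prefix_cons] at h
      rw [List.cons_prefix_cons]
      exact ⟨h.1, ih (fun hmem => hm (List.mem_cons_of_mem _ hmem)) h.2⟩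

-- a space-free pattern is an infix of u ++ ' ' :: v iff it is an infix of u or of v
theorem pv_infix_sep {m : List Char} (hm : ' ' ∉ m) (u v : List Char) :
    m <:+: u ++ ' ' :: v ↔ m <:+: u ∨ m <:+: v := by
  constructor
  · intro h
    induction u with
    | nil =>
      rw [List.nil_append, List.infix_cons_iff] at h
      rcases h with hp | hi
      · cases m with
        | nil => exact Or.inl (List.nil_infix)
        | cons a t =>
          rw [List.cons_prefix_cons] at hp
          exact absurd (hp.1 ▸ List.mem_cons_self) hm
      · exact Or.inr hi
    | cons b u' ih =>
      rw [List.cons_append, List.infix_cons_iff] at h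
      rcases h with hp | hi
      · exact Or.inl (pv_prefix_of_sep hm hp).isInfix
      · rcases ih hi with h' | h'
        · exact Or.inl (List.infix_cons_iff.mpr (Or.inr h'))
        · exact Or.inr h'
  · rintro (h | h)
    · exact h.trans (List.prefix_append u (' ' :: v)).isInfix
    · exact h.trans ((List.suffix_cons ' ' v).trans (List.suffix_append u _)).isInfix

-- a nonempty space-free pattern is an infix of the space-join iff it is an infix of some part
theorem pv_infix_join {m : List Char} (hm : ' ' ∉ m) (hne : m ≠ []) (parts : List (List Char)) :
    m <:+: PySem.Chars.join [' '] parts ↔ ∃ x ∈ parts, m <:+: x := by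
  induction parts with
  | nil =>
    simp only [PySem.Chars.join_nil, List.infix_nil]
    simp [hne]
  | cons x t ih =>
    cases t with
    | nil => simp [PySem.Chars.join_singleton]
    | cons y t' =>
      rw [PySem.Chars.join_cons_cons]
      have harr : x ++ [' '] ++ PySem.Chars.join [' '] (y :: t') =
          x ++ ' ' :: PySem.Chars.join [' '] (y :: t') := by simp
      rw [harr, pv_infix_sep hm, ih]
      simp

-- lowercasing distributes over the space-join (lowerChar ' ' = ' ')
theorem pv_lower_join (parts : List (List Char)) :
    PySem.Chars.lower (PySem.Chars.join [' '] parts) =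
      PySem.Chars.join [' '] (parts.map PySem.Chars.lower) := by
  induction parts with
  | nil => simp [PySem.Chars.join_nil, PySem.Chars.lower]
  | cons x t ih =>
    cases t with
    | nil => simp [PySem.Chars.join_singleton]
    | cons y t' =>
      rw [PySem.Chars.join_cons_cons]
      rw [show PySem.Chars.join [' '] (List.map PySem.Chars.lower (x :: y :: t')) =
            PySem.Chars.lower x ++ [' '] ++ PySem.Chars.join [' '] (List.map PySem.Chars.lower (y :: t')) from
          PySem.Chars.join_cons_cons ..]
      simp only [PySem.Chars.lower, List.map_append] at ih ⊢
      rw [ih]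
      rfl

-- A's membership test on the lowercased combined string equals "some value matches"
theorem pv_isIn_lower_join (m : String) (hm : ' ' ∉ m.toList) (hne : m.toList ≠ [])
    (vals : List String) :
    PySem.Str.isIn m (PySem.Str.lower (PySem.Str.join " " vals)) =
      vals.any (fun v => PySem.Str.isIn m (PySem.Str.lower v)) := by
  rw [Bool.eq_iff_iff, PySem.Str.isIn_iff_infix, PySem.Str.toList_lower, PySem.Str.toList_join]
  have hsep : (" " : String).toList = [' '] := rfl
  rw [hsep, pv_lower_join, pv_infix_join hm hne, List.any_eq_true]
  constructor
  · rintro ⟨x, hx, hinf⟩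
    rw [List.mem_map] at hx
    obtain ⟨s, hs, rfl⟩ := hx
    rw [List.mem_map] at hs
    obtain ⟨v, hv, rfl⟩ := hs
    exact ⟨v, hv, (PySem.Str.isIn_iff_infix _ _).mpr (by rw [PySem.Str.toList_lower]; exact hinf)⟩
  · rintro ⟨v, hv, hIn⟩
    refine ⟨PySem.Chars.lower v.toList, ?_, ?_⟩
    · exact List.mem_map.mpr ⟨v.toList, List.mem_map.mpr ⟨v, hv, rfl⟩, rfl⟩
    · have := (PySem.Str.isIn_iff_infix _ _).mp hIn
      rwa [PySem.Str.toList_lower] at this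
  
-- B's fold accumulates exactly the four "some value matches" flags
theorem pv_fold_char (vals : List String) (i1 i2 i3 i4 : Bool) :
    vals.foldl pvStep (i1, i2, i3, i4) =
      (i1 || vals.any (fun v => PySem.Str.isIn "invariant_" (PySem.Str.lower v)),
       i2 || vals.any (fun v => PySem.Str.isIn "echidna" (PySem.Str.lower v)),
       i3 || vals.any (fun v => PySem.Str.isIn "assert(" (PySem.Str.lower v)),
       i4 || vals.any (fun v => PySem.Str.isIn "test" (PySem.Str.lower v))) := by
  induction vals generalizing i1 i2 i3 i4 with
  | nil => simp
  | cons v t ih =>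
    simp only [List.foldl_cons, List.any_cons, pvStep, ih, Bool.or_assoc]

-- ===== VERDICT (by name: the statement is the Claim_ definition above) =====
theorem has_echidna_harness_spec : Claim_equal_has_echidna_harness := by
  intro test_files _
  unfold Spec_has_echidna_harness has_echidna_harness has_echidna_harness_alt
  cases test_files with
  | nil => rfl
  | cons p t =>
    simp only [if_neg (List.cons_ne_nil p t)]
    rw [pv_fold_char,
        pv_isIn_lower_join "invariant_" (by decide) (by decide),
        pv_isIn_lower_join "echidna" (by decide) (by decide),
        pv_isIn_lower_join "assert(" (by decide) (by decide),
        pv_isIn_lower_join "test" (by decide) (by decide)]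
    simp
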